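-- pv_equiv track=rewrite | github.com/damienmarsic/dmbiolib | build/lib/dmbiolib.py | find_ambiguous
-- ===== SOURCE A (Python) =====
-- def find_ambiguous(x):
--     y={}
--     for i in range(len(x)):
--         if x[i] not in 'atgc' and (i==0 or x[i-1] in 'atgc'):
--             j=1
--             while i+j<len(x) and x[i+j] not in 'atgc':
--                 j+=1
--             y[i]=j
--     return y
-- ===== SOURCE B (Python) =====
-- def find_ambiguous(x):
--     y = {}
--     start = None
--     for i, c in enumerate(x):
--         if c not in 'atgc':
--             if start is None:
--                 start = i
--         elif start is not None:
--             y[start] = i - start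
--             start = None
--     if start is not None:
--         y[start] = len(x) - start
--     return y
-- ===== Notes on version B (the rewrite author's own statement) =====
-- stated objective: alternative
-- what changed: Replaced A's index loop with an inner while-lookahead per run start by a single state-machine pass that carries the current run start and flushes the run length when the run ends (or at end of string).
import Mathlib
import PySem

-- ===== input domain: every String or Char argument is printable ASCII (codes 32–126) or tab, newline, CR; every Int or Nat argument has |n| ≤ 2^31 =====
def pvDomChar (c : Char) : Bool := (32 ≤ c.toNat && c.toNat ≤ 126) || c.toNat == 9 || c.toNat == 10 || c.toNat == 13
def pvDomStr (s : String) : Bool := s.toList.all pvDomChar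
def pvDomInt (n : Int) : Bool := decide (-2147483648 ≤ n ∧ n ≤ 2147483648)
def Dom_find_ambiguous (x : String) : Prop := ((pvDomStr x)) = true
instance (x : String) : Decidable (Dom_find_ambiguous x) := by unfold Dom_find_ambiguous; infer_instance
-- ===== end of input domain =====

-- ===== PORT A =====
-- B replaces A's inner while-lookahead by one state-machine pass (alternative decomposition, same O(n)).
-- membership in 'atgc': pvAmb c = true iff c is ambiguous (not one of a,t,g,c)
def pvAmb (c : Char) : Bool := !(c == 'a' || c == 't' || c == 'g' || c == 'c')

-- A's inner 'while i+j<len(x) and x[i+j] not in atgc: j+=1'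
def pvWh (l : List Char) (i j : Nat) : Nat :=
  if _h : i + j < l.length ∧ pvAmb (l.getD (i + j) 'a') = true then pvWh l i (j + 1) else j
termination_by l.length - (i + j)

-- A's outer 'for i in range(len(x))', emitting y[i]=j in index order (keys are distinct)
def pvAOuter (l : List Char) (i : Nat) : List (Int × Int) :=
  if _h : i < l.length then
    (if pvAmb (l.getD i 'a') && (decide (i = 0) || !pvAmb (l.getD (i - 1) 'a'))
     then [((i : Int), (pvWh l i 1 : Int))] else []) ++ pvAOuter l (i + 1)
  else []
termination_by l.length - i

def find_ambiguous (x : String) : List (Int × Int) := pvAOuter x.toList 0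

-- ===== PORT B =====
-- B's single pass: i is the current index, start the pending run start (None outside a run);
-- the base case is the post-loop flush 'if start is not None: y[start]=len(x)-start'.
def pvBLoop (l : List Char) (i : Nat) (start : Option Nat) : List (Int × Int) :=
  match l with
  | [] =>
    match start with
    | some s => [((s : Int), (i : Int) - (s : Int))]
    | none => []
  | c :: t =>
    if pvAmb c then
      pvBLoop t (i + 1) (match start with | none => some i | some s => some s)
    else
      match start with
      | some s => ((s : Int), (i : Int) - (s : Int)) :: pvBLoop t (i + 1) none
      | none => pvBLoop t (i + 1) none

def find_ambiguous_alt (x : String) : List (Int × Int) := pvBLoop x.toList 0 none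

-- ===== PRECONDITION & SPEC =====
def Spec_find_ambiguous (x : String) (out : List (Int × Int)) : Prop := out = find_ambiguous_alt x
instance (x : String) (out : List (Int × Int)) : Decidable (Spec_find_ambiguous x out) := by unfold Spec_find_ambiguous; infer_instance

-- ===== CLAIM (what is proved, stated in full; the proofs are below) =====
def Claim_equal_find_ambiguous : Prop := ∀ (x : String), Dom_find_ambiguous x → Spec_find_ambiguous x (find_ambiguous x)

-- ===== LEMMAS AND PROOFS =====

-- number of consecutive ambiguous characters starting at position p
def pvCnt (l : List Char) (p : Nat) : Nat :=
  if _h : p < l.length ∧ pvAmb (l.getD p 'a') = true then 1 + pvCnt l (p + 1) else 0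
termination_by l.length - p

theorem pvWh_eq (l : List Char) (i j : Nat) : pvWh l i j = j + pvCnt l (i + j) := by
  rw [pvWh, pvCnt]
  split
  · have := pvWh_eq l i (j + 1)
    rw [this]
    have : i + (j + 1) = i + j + 1 := by omega
    rw [this]; omega
  · omega
termination_by l.length - (i + j)

theorem pvCnt_le (l : List Char) (p : Nat) (hp : p ≤ l.length) : p + pvCnt l p ≤ l.length := by
  rw [pvCnt]
  split
  · rename_i h
    have := pvCnt_le l (p + 1) (by omega)
    omega
  · omega
termination_by l.length - p

theorem pvCnt_stop (l : List Char) (p : Nat) (h : p + pvCnt l p < l.length) :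
    pvAmb (l.getD (p + pvCnt l p) 'a') = false := by
  rw [pvCnt] at h ⊢
  split at h
  · rename_i hc
    rw [dif_pos hc] at *
    have := pvCnt_stop l (p + 1) (by omega)
    have e : p + (1 + pvCnt l (p + 1)) = p + 1 + pvCnt l (p + 1) := by omega
    rw [e]; exact this
  · rename_i hc
    rw [dif_neg hc]
    simp only [Nat.add_zero] at h ⊢
    cases h2 : pvAmb (l.getD p 'a') with
    | false => rfl
    | true => exact absurd ⟨h, h2⟩ hc
termination_by l.length - p

-- A skips every in-run index (previous char ambiguous): the bracket condition is false
theorem pvA_skip (l : List Char) (d : Nat) : ∀ m, m ≠ 0 → pvAmb (l.getD (m - 1) 'a') = true →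
    d = pvCnt l m → pvAOuter l m = pvAOuter l (m + d) := by
  induction d with
  | zero => intro m _ _ _; rfl
  | succ d ih =>
    intro m hm hprev hd
    rw [pvCnt] at hd
    split at hd
    · rename_i hc
      have hstep : pvAOuter l m = pvAOuter l (m + 1) := by
        rw [pvAOuter]
        rw [dif_pos hc.1]
        have hb : (decide (m = 0) || !pvAmb (l.getD (m - 1) 'a')) = false := by
          rw [hprev]; simp [hm]
        rw [hb]
        simp
      rw [hstep]
      have : m + (d + 1) = (m + 1) + d := by omega
      rw [this]
      exact ih (m + 1) (by omega) (by rw [Nat.add_sub_cancel]; exact hc.2) (by omega)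
    · omega

theorem pvDrop_cons (l : List Char) (m : Nat) (h : m < l.length) :
    l.drop m = l.getD m 'a' :: l.drop (m + 1) := by
  rw [List.getD_eq_getElem l 'a' h]
  exact List.drop_eq_getElem_cons h

-- B consumes the current ambiguous run of length d and flushes it
theorem pvB_run (l : List Char) (d : Nat) : ∀ m s, m ≤ l.length → d = pvCnt l m →
    pvBLoop (l.drop m) m (some s) =
      if m + d < l.length
      then ((s : Int), ((m + d : Nat) : Int) - (s : Int)) :: pvBLoop (l.drop (m + d + 1)) (m + d + 1) none
      else [((s : Int), (l.length : Int) - (s : Int))] := by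
  induction d with
  | zero =>
    intro m s hm hd
    rw [pvCnt] at hd
    split at hd
    · omega
    · rename_i hc
      by_cases hlt : m < l.length
      · have hamb : pvAmb (l.getD m 'a') = false := by
          cases h2 : pvAmb (l.getD m 'a') with
          | false => rfl
          | true => exact absurd ⟨hlt, h2⟩ hc
        rw [pvDrop_cons l m hlt, pvBLoop, hamb]
        rw [if_neg Bool.false_ne_true]
        simp only [Nat.add_zero, if_pos hlt]
      · have hme : m = l.length := by omega
        subst hme
        have hnil : l.drop l.length = [] := List.drop_eq_nil_of_le (by omega)
        rw [hnil, pvBLoop]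
        simp only [Nat.add_zero]
        rw [if_neg (lt_irrefl _)]
  | succ d ih =>
    intro m s hm hd
    rw [pvCnt] at hd
    split at hd
    · rename_i hc
      rw [pvDrop_cons l m hc.1, pvBLoop, hc.2]
      rw [if_pos rfl]
      have := ih (m + 1) s (by omega) (by omega)
      rw [this]
      have e : m + 1 + d = m + (d + 1) := by omega
      rw [e]
    · omega

-- main lemma: outside a run, A from index m equals B on the suffix from m with no pending start
theorem pvMain (l : List Char) (n : Nat) : ∀ m, n = l.length - m → m ≤ l.length →
    (m = 0 ∨ pvAmb (l.getD (m - 1) 'a') = false) →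
    pvAOuter l m = pvBLoop (l.drop m) m none := by
  induction n using Nat.strong_induction_on with
  | _ n ih =>
    intro m hn hm hout
    by_cases hlt : m < l.length
    · cases hamb : pvAmb (l.getD m 'a') with
      | false =>
        -- current char not ambiguous: both just advance
        rw [pvAOuter, dif_pos hlt, hamb]
        simp only [Bool.false_and, Bool.false_eq_true, if_false, List.nil_append]
        rw [pvDrop_cons l m hlt, pvBLoop, hamb]
        rw [if_neg Bool.false_ne_true]
        exact ih (l.length - (m + 1)) (by omega) (m + 1) rfl (by omega)
          (Or.inr (by rw [Nat.add_sub_cancel]; exact hamb))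
      | true =>
        -- run starts at m
        have hcond : (pvAmb (l.getD m 'a') && (decide (m = 0) || !pvAmb (l.getD (m - 1) 'a'))) = true := by
          rcases hout with h0 | hprev
          · subst h0; rw [hamb]; simp
          · rw [hamb, hprev]; simp
        rw [pvAOuter, dif_pos hlt, hcond]
        rw [if_pos rfl]
        simp only [List.singleton_append]
        rw [pvWh_eq l m 1]
        set d := pvCnt l (m + 1) with hdd
        have hskip := pvA_skip l d (m + 1) (by omega) (by rw [Nat.add_sub_cancel]; exact hamb) rfl
        rw [hskip]
        -- B side
        rw [pvDrop_cons l m hlt, pvBLoop, hamb]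
        rw [if_pos rfl]
        rw [pvB_run l d (m + 1) m (by omega) rfl]
        have hle := pvCnt_le l (m + 1) (by omega)
        by_cases hend : m + 1 + d < l.length
        · rw [if_pos hend]
          have hstop : pvAmb (l.getD (m + 1 + d) 'a') = false := by
            have := pvCnt_stop l (m + 1) (by omega)
            simpa [Nat.add_assoc] using this
          have hstep : pvAOuter l (m + 1 + d) = pvAOuter l (m + 1 + d + 1) := by
            rw [pvAOuter, dif_pos hend, hstop]
            simp
          rw [hstep]
          have htail := ih (l.length - (m + 1 + d + 1)) (by omega) (m + 1 + d + 1) rfl (by omega)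
            (Or.inr (by rw [Nat.add_sub_cancel]; exact hstop))
          rw [htail]
          have he : ((1 + d : Nat) : Int) = ((m + 1 + d : Nat) : Int) - (m : Int) := by
            push_cast; ring
          rw [he]
        · rw [if_neg hend]
          have hme : m + 1 + d = l.length := by omega
          have : pvAOuter l (m + 1 + d) = [] := by
            rw [pvAOuter, dif_neg (by omega)]
          rw [this]
          have he : ((1 + d : Nat) : Int) = ((l.length : Nat) : Int) - (m : Int) := by
            rw [← hme]; push_cast; ring
          rw [he]
    · have hme : m = l.length := by omega
      rw [pvAOuter, dif_neg hlt]
      rw [List.drop_eq_nil_of_le (by omega), pvBLoop]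

-- ===== VERDICT (by name: the statement is the Claim_ definition above) =====
theorem find_ambiguous_spec : Claim_equal_find_ambiguous := by
  intro x _
  unfold Spec_find_ambiguous find_ambiguous find_ambiguous_alt
  simpa using pvMain x.toList (x.toList.length) 0 (by omega) (by omega) (Or.inl rfl)
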